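-- pv_equiv track=rewrite | github.com/jellyboston/CPSC-3650-Algorithms | PSET2/Cyclic_Fencing/build_fence.py | brute_force_optimize
-- ===== SOURCE A (Python) =====
-- def brute_force_optimize(d, l):
--     """ Finds the minimum fence by finding all greedy solitions from all possible starting points """
--     # This is not a proper solution because it does not meet the time bound!
--
--     best = None
--
--     # try all starting points
--     start = 0
--     while d[start] < l:
--         # move points before start to end
--         translated = d[start:]
--         for i in range(1, start + 1):
--             translated.append(d[i] + d[-1])
--
--         # build the greedy fence starting at l
--         candidate = greedy_fence(translated, l)
--         if best is None or len(candidate) < len(best):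
--             best = candidate
--         start = start + 1
--     return best
--
-- def greedy_fence(d, l):
--     """ Returns a subsequence of d that starts at 0.0 and ends at d[len(d)-1] such that
--         consecutive elements of d are no more then L apart and the length of the returned
--         list is as short as possible given that condition.
--
--         d -- an increasing list of at least two numbers giving the locations of
--              the corners of the house and the trees where fence segments can end
--         l -- a positive number no less that the greatest difference between consecutive elements of d
--     """
--     ends = [d[0]] # where the endpoints of the fence segments are; first is at corner of house
--     for i in range(1, len(d)):
--         if d[i] - ends[-1] > l:
--             # can't get from last endpoint to d[i]
--             ends.append(d[i - 1])
--     ends.append(d[-1]) # end at other corner of house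
--     return ends
-- ===== SOURCE B (Python) =====
-- def brute_force_optimize(d, l):
--     """Jump-pointer rewrite: precompute next-trigger tables on the doubled point
--     array once, then count each rotation's fence by following pointers and
--     rebuild only the winning fence (no rotated lists, no per-rotation rescan)."""
--     n = len(d)
--     last = d[-1]
--     dd = d + [d[i] + last for i in range(1, n)]
--     m = len(dd)
--
--     def first_over(q, base):
--         # first index q' >= q with dd[q'] - base > l (m if none)
--         while q < m and dd[q] - base <= l:
--             q += 1
--         return q
--
--     # trigger tables shared by every rotation: from a fence endpoint at dd[p]
--     # the scan first fires at m0[p]; after a fire at q it next fires at m1[q]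
--     m0 = [first_over(p + 1, dd[p]) for p in range(m)]
--     m1 = [m] + [first_over(q + 1, dd[q - 1]) for q in range(1, m)]
--
--     best_s = None
--     best_c = None
--     s = 0
--     while d[s] < l:
--         end = s + n - 1
--         c = 2
--         q = m0[s]
--         while q <= end:
--             c += 1
--             q = m1[q]
--         if best_c is None or c < best_c:
--             best_s, best_c = s, c
--         s += 1
--     if best_s is None:
--         return None
--
--     # rebuild the single winning fence from the tables
--     end = best_s + n - 1
--     ends = [dd[best_s]]
--     q = m0[best_s]
--     while q <= end:
--         ends.append(dd[q - 1])
--         q = m1[q]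
--     ends.append(dd[end])
--     return ends
-- ===== Notes on version B (the rewrite author's own statement) =====
-- stated objective: faster
-- what changed: A materializes a rotated copy of the points for every start and re-runs the full greedy gap scan over it; B builds the doubled point array once, precomputes two next-trigger jump tables on it (from an endpoint at dd[p] the scan first fires at m0[p]; after a fire at q it next fires at m1[q]), counts each rotation's fence by following pointers inside its window, and rebuilds only the winning fence from the tables.
import Mathlib
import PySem

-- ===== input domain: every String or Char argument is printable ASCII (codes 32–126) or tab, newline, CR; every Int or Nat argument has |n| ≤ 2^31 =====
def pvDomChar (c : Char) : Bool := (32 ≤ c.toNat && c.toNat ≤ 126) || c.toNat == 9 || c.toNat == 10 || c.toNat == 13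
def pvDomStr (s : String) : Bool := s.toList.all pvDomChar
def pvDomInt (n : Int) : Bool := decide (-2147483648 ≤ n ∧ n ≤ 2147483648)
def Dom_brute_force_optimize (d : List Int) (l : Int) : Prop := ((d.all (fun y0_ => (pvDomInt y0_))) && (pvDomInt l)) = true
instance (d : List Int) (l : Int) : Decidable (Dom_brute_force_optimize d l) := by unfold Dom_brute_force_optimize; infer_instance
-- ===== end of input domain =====

-- B replaces A's per-start rotated copies and repeated greedy scans by next-trigger
-- jump tables precomputed once on the doubled point array; equal return value proved on Pre_.

-- ===== PORT A =====

-- helper greedy_fence of Source A, line by line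
def greedy_fence (d : List Int) (l : Int) : List Int :=
  let ends := [PySem.List.pyGetD d 0 0]                             -- ends = [d[0]]
  let ends := (PySem.List.pyRange 1 (PySem.List.len d) 1).foldl     -- for i in range(1, len(d)):
    (fun ends i =>
      if PySem.List.pyGetD d i 0 - PySem.List.pyGetD ends (-1) 0 > l  -- if d[i] - ends[-1] > l:
      then ends ++ [PySem.List.pyGetD d (i - 1) 0]                    --   ends.append(d[i-1])
      else ends) ends
  ends ++ [PySem.List.pyGetD d (-1) 0]                              -- ends.append(d[-1])

-- 'if best is None or len(candidate) < len(best): best = candidate'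
def py_update_best (best : Option (List Int)) (candidate : List Int) : Option (List Int) :=
  match best with
  | none => some candidate
  | some b => if candidate.length < b.length then some candidate else some b

-- the 'while d[start] < l' loop; fuel d.length+1 suffices whenever Python terminates
-- (pyGet? = none is Python's IndexError, excluded by Pre_; we return best there as a totality guard)
def bf_loop (d : List Int) (l : Int) : Nat → Int → Option (List Int) → Option (List Int)
  | 0, _, best => best
  | fuel + 1, start, best =>
    match PySem.List.pyGet? d start with
    | none => best
    | some x =>
      if x < l then
        let translated := PySem.List.slice d (some start) none      -- translated = d[start:]
        let translated := (PySem.List.pyRange 1 (start + 1) 1).foldl -- for i in range(1, start+1):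
          (fun t i => t ++ [PySem.List.pyGetD d i 0 + PySem.List.pyGetD d (-1) 0]) translated
        let candidate := greedy_fence translated l
        bf_loop d l fuel (start + 1) (py_update_best best candidate)
      else best

def brute_force_optimize (d : List Int) (l : Int) : Option (List Int) :=
  bf_loop d l (d.length + 1) 0 none

-- ===== PORT B =====

-- Source B's first_over(q, base): first q' ≥ q with dd[q'] - base > l, else m
-- (the while loop gets the fuel dd.length+1, enough since q increases to m at most)
def first_over (dd : List Int) (l m : Int) : Nat → Int → Int → Int
  | 0, q, _ => q
  | fuel + 1, q, base =>
    if q < m ∧ PySem.List.pyGetD dd q 0 - base ≤ l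
    then first_over dd l m fuel (q + 1) base
    else q

-- dd = d + [d[i] + last for i in range(1, n)]
def ddOf (d : List Int) : List Int :=
  d ++ (PySem.List.pyRange 1 (PySem.List.len d) 1).map
    (fun i => PySem.List.pyGetD d i 0 + PySem.List.pyGetD d (-1) 0)

-- m0 = [first_over(p + 1, dd[p]) for p in range(m)]
def m0Of (dd : List Int) (l : Int) : List Int :=
  (PySem.List.pyRange 0 (PySem.List.len dd) 1).map
    (fun p => first_over dd l (PySem.List.len dd) (dd.length + 1) (p + 1) (PySem.List.pyGetD dd p 0))

-- m1 = [m] + [first_over(q + 1, dd[q - 1]) for q in range(1, m)]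
def m1Of (dd : List Int) (l : Int) : List Int :=
  [PySem.List.len dd] ++ (PySem.List.pyRange 1 (PySem.List.len dd) 1).map
    (fun q => first_over dd l (PySem.List.len dd) (dd.length + 1) (q + 1) (PySem.List.pyGetD dd (q - 1) 0))

-- 'c = 2; q = m0[s]; while q <= end: c += 1; q = m1[q]' (fuel: q strictly increases)
def walk_count (m1 : List Int) (endw : Int) : Nat → Int → Int → Int
  | 0, _, c => c
  | fuel + 1, q, c =>
    if q ≤ endw then walk_count m1 endw fuel (PySem.List.pyGetD m1 q 0) (c + 1) else c

-- the reconstruction walk: 'while q <= end: ends.append(dd[q - 1]); q = m1[q]'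
def walk_build (m1 dd : List Int) (endw : Int) : Nat → Int → List Int → List Int
  | 0, _, ends => ends
  | fuel + 1, q, ends =>
    if q ≤ endw
    then walk_build m1 dd endw fuel (PySem.List.pyGetD m1 q 0) (ends ++ [PySem.List.pyGetD dd (q - 1) 0])
    else ends

-- 'if best_c is None or c < best_c: best_s, best_c = s, c'
def alt_update (best : Option (Int × Int)) (s c : Int) : Option (Int × Int) :=
  match best with
  | none => some (s, c)
  | some (bs, bc) => if c < bc then some (s, c) else some (bs, bc)

-- Source B's 'while d[s] < l' counting loop (same totality guard as A's loop)
def alt_loop (d : List Int) (l n : Int) (m0 m1 : List Int) : Nat → Int → Option (Int × Int) → Option (Int × Int)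
  | 0, _, best => best
  | fuel + 1, s, best =>
    match PySem.List.pyGet? d s with
    | none => best
    | some x =>
      if x < l then
        alt_loop d l n m0 m1 fuel (s + 1)
          (alt_update best s (walk_count m1 (s + n - 1) (m1.length + 1) (PySem.List.pyGetD m0 s 0) 2))
      else best

def brute_force_optimize_alt (d : List Int) (l : Int) : Option (List Int) :=
  let dd := ddOf d
  let m0 := m0Of dd l
  let m1 := m1Of dd l
  match alt_loop d l (PySem.List.len d) m0 m1 (d.length + 1) 0 none with
  | none => none
  | some (bs, _) =>
    let endw := bs + PySem.List.len d - 1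
    some ((walk_build m1 dd endw (m1.length + 1) (PySem.List.pyGetD m0 bs 0)
            [PySem.List.pyGetD dd bs 0]) ++ [PySem.List.pyGetD dd endw 0])

-- ===== PRECONDITION & SPEC =====
-- Pre_ excludes exactly the inputs where A raises IndexError: d empty or every element < l
-- (the start scan 'while d[start] < l' runs off the end of d).
def Pre_brute_force_optimize (d : List Int) (l : Int) : Prop := ∃ x ∈ d, l ≤ x
instance (d : List Int) (l : Int) : Decidable (Pre_brute_force_optimize d l) := by
  unfold Pre_brute_force_optimize; infer_instance

def pvWitness_brute_force_optimize : List Int × Int := ([0, 5], 3)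

def Spec_brute_force_optimize (d : List Int) (l : Int) (out : Option (List Int)) : Prop := out = brute_force_optimize_alt d l
instance (d : List Int) (l : Int) (out : Option (List Int)) : Decidable (Spec_brute_force_optimize d l out) := by unfold Spec_brute_force_optimize; infer_instance

-- ===== CLAIM (what is proved, stated in full; the proofs are below) =====
def Claim_equal_brute_force_optimize : Prop := ∀ (d : List Int) (l : Int), Dom_brute_force_optimize d l → Pre_brute_force_optimize d l → Spec_brute_force_optimize d l (brute_force_optimize d l)

-- ===== LEMMAS AND PROOFS =====

-- the rotated list and candidate fence A computes for start s (shared vocabulary)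
def rotA (d : List Int) (l : Int) (s : Nat) : List Int :=
  PySem.List.slice d (some (s : Int)) none ++
    (PySem.List.pyRange 1 ((s : Int) + 1) 1).map
      (fun i => PySem.List.pyGetD d i 0 + PySem.List.pyGetD d (-1) 0)

def rotCand (d : List Int) (l : Int) (s : Nat) : List Int := greedy_fence (rotA d l s) l

-- the scan tail of the greedy fence, as a difference list (scan index i, endpoint value v)
def tailFence (t : List Int) (l : Int) : Nat → Nat → Int → List Int
  | 0, _, _ => []
  | k + 1, i, v =>
    if PySem.List.pyGetD t (i : Int) 0 - v > l
    then PySem.List.pyGetD t ((i : Int) - 1) 0 ::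
         tailFence t l k (i + 1) (PySem.List.pyGetD t ((i : Int) - 1) 0)
    else tailFence t l k (i + 1) v

-- absolute position of the first trigger at or after j, for endpoint value v (xs.length if none)
def fIdx (xs : List Int) (l v : Int) (j : Nat) : Nat :=
  j + (xs.drop j).findIdx (fun x => decide (x - v > l))


-- ===== small library gap: findIdx on a take =====
theorem findIdx_take_min (p : Int → Bool) : ∀ (xs : List Int) (k : Nat),
    ((xs.take k).findIdx p) = min (xs.findIdx p) k := by
  intro xs
  induction xs with
  | nil => intro k; simp
  | cons a xs ih =>
    intro k
    cases k with
    | zero => simp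
    | succ k =>
      by_cases hpa : p a
      · simp [List.findIdx_cons, hpa]
      · simp [List.findIdx_cons, hpa, ih k, Nat.succ_min_succ]

-- ===== first_over and the jump tables compute fIdx =====
theorem first_over_spec (dd : List Int) (l base : Int) :
    ∀ (fuel j : Nat), dd.length ≤ fuel + j →
      first_over dd l (PySem.List.len dd) fuel (j : Int) base = ((fIdx dd l base j : Nat) : Int) := by
  intro fuel
  induction fuel with
  | zero =>
    intro j h
    have hd : dd.drop j = [] := List.drop_eq_nil_of_le (by omega)
    simp [first_over, fIdx, hd]
  | succ fuel ih =>
    intro j h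
    simp only [first_over, PySem.List.len_eq]
    by_cases hj : j < dd.length
    · have hget : PySem.List.pyGetD dd (j : Int) 0 = dd[j] := by
        rw [PySem.List.pyGetD_eq_getElem dd 0 (by omega) (by exact_mod_cast hj)]
        simp
      have hdrop : dd.drop j = dd[j] :: dd.drop (j + 1) := List.drop_eq_getElem_cons hj
      by_cases hc : dd[j] - base ≤ l
      · rw [if_pos ⟨by exact_mod_cast hj, by rw [hget]; exact hc⟩]
        have hcast : ((j : Int) + 1) = ((j + 1 : Nat) : Int) := by push_cast; ring
        rw [hcast]
        have := ih (j + 1) (by omega)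
        rw [PySem.List.len_eq] at this
        rw [this]
        have : fIdx dd l base j = fIdx dd l base (j + 1) := by
          unfold fIdx
          rw [hdrop, List.findIdx_cons]
          have : (decide (dd[j] - base > l)) = false := by simp; omega
          rw [this]
          simp only [cond_false]
          omega
        rw [this]
      · rw [if_neg (by rw [hget]; tauto)]
        have : fIdx dd l base j = j := by
          unfold fIdx
          rw [hdrop, List.findIdx_cons]
          have : (decide (dd[j] - base > l)) = true := by simp; omega
          rw [this]
          simp
        rw [this]
    · rw [if_neg (by intro hcon; exact hj (by exact_mod_cast hcon.1))]
      have hd : dd.drop j = [] := List.drop_eq_nil_of_le (by omega)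
      simp [fIdx, hd]

theorem m0_lookup (dd : List Int) (l : Int) (s : Nat) (hs : s < dd.length) :
    PySem.List.pyGetD (m0Of dd l) (s : Int) 0 = ((fIdx dd l (dd[s]) (s + 1) : Nat) : Int) := by
  unfold m0Of
  rw [PySem.List.len_eq,
    PySem.List.pyGetD_map_pyRange_of_nonneg _ _ _ _ (by omega) (by exact_mod_cast hs)]
  have hget : PySem.List.pyGetD dd (s : Int) 0 = dd[s] := by
    rw [PySem.List.pyGetD_eq_getElem dd 0 (by omega) (by exact_mod_cast hs)]
    simp
  have hcast : ((s : Int) + 1) = ((s + 1 : Nat) : Int) := by push_cast; ring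
  rw [hget, hcast]
  have := first_over_spec dd l (dd[s]) (dd.length + 1) (s + 1) (by omega)
  rw [PySem.List.len_eq] at this
  exact this

theorem m1_lookup (dd : List Int) (l : Int) (q : Nat) (h1 : 1 ≤ q) (h2 : q < dd.length) :
    PySem.List.pyGetD (m1Of dd l) (q : Int) 0
      = ((fIdx dd l (dd[q - 1]'(by omega)) (q + 1) : Nat) : Int) := by
  obtain ⟨k, rfl⟩ : ∃ k, q = k + 1 := ⟨q - 1, by omega⟩
  unfold m1Of
  rw [PySem.List.pyGetD_natCast]
  rw [List.singleton_append, List.getD_cons_succ]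
  rw [PySem.List.len_eq, PySem.List.pyRange_one, List.map_map]
  have hlt : k < ((dd.length : Int) - 1).toNat := by omega
  rw [List.getD_eq_getElem _ _ (by simpa using hlt)]
  rw [List.getElem_map, List.getElem_range]
  simp only [Function.comp]
  have hc1 : ((1 : Int) + (k : Int)) = (((k + 1 : Nat)) : Int) := by push_cast; ring
  rw [hc1]
  have hget : PySem.List.pyGetD dd (((k + 1 : Nat) : Int) - 1) 0 = dd[k + 1 - 1]'(by omega) := by
    have : (((k + 1 : Nat) : Int) - 1) = ((k : Nat) : Int) := by push_cast; ring
    rw [this, PySem.List.pyGetD_eq_getElem dd 0 (by omega) (by exact_mod_cast (by omega : k < dd.length))]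
    simp
  rw [hget]
  have hcast : (((k + 1 : Nat) : Int) + 1) = ((k + 1 + 1 : Nat) : Int) := by push_cast; ring
  rw [hcast]
  have := first_over_spec dd l (dd[k + 1 - 1]'(by omega)) (dd.length + 1) (k + 1 + 1) (by omega)
  rw [PySem.List.len_eq] at this
  exact this

theorem length_m1Of (dd : List Int) (l : Int) (h : dd ≠ []) : (m1Of dd l).length = dd.length := by
  have hpos : 0 < dd.length := List.length_pos_iff.mpr h
  unfold m1Of
  rw [PySem.List.len_eq]
  simp [PySem.List.length_pyRange_one]
  omega

-- ===== the greedy scan as a difference list =====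
theorem fold_tail (t : List Int) (l : Int) :
    ∀ (k j : Nat) (ends : List Int), ends ≠ [] →
      (PySem.List.pyRange (j : Int) ((j + k : Nat) : Int) 1).foldl
        (fun es i => if PySem.List.pyGetD t i 0 - PySem.List.pyGetD es (-1) 0 > l
                     then es ++ [PySem.List.pyGetD t (i - 1) 0] else es) ends
      = ends ++ tailFence t l k j (PySem.List.pyGetD ends (-1) 0) := by
  intro k
  induction k with
  | zero =>
    intro j ends h
    rw [PySem.List.pyRange_one_eq_nil (by omega)]
    simp [tailFence]
  | succ k ih =>
    intro j ends h
    rw [PySem.List.pyRange_one_cons (by push_cast; omega)]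
    simp only [List.foldl_cons]
    have hc2 : ((j : Int) + 1) = (((j + 1 : Nat)) : Int) := by push_cast; ring
    have hc3 : ((j + (k + 1) : Nat) : Int) = (((j + 1) + k : Nat) : Int) := by push_cast; ring
    by_cases hc : PySem.List.pyGetD t (j : Int) 0 - PySem.List.pyGetD ends (-1) 0 > l
    · rw [if_pos hc, hc2, hc3, ih (j + 1) _ (by simp)]
      rw [PySem.List.pyGetD_neg_one_append_singleton]
      have : tailFence t l (k + 1) j (PySem.List.pyGetD ends (-1) 0)
          = PySem.List.pyGetD t ((j : Int) - 1) 0 ::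
            tailFence t l k (j + 1) (PySem.List.pyGetD t ((j : Int) - 1) 0) := by
        simp only [tailFence]
        rw [if_pos hc]
      rw [this, List.append_assoc]
      simp
    · rw [if_neg hc, hc2, hc3, ih (j + 1) _ h]
      have : tailFence t l (k + 1) j (PySem.List.pyGetD ends (-1) 0)
          = tailFence t l k (j + 1) (PySem.List.pyGetD ends (-1) 0) := by
        simp only [tailFence]
        rw [if_neg hc]
      rw [this]

theorem greedy_eq (t : List Int) (l : Int) (h : t ≠ []) :
    greedy_fence t l
      = (PySem.List.pyGetD t 0 0 ::
          tailFence t l (t.length - 1) 1 (PySem.List.pyGetD t 0 0)) ++ [PySem.List.pyGetD t (-1) 0] := by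
  have hlen : 0 < t.length := List.length_pos_iff.mpr h
  have hr : PySem.List.pyRange 1 (PySem.List.len t) 1
      = PySem.List.pyRange (((1 : Nat)) : Int) (((1 + (t.length - 1) : Nat)) : Int) 1 := by
    rw [PySem.List.len_eq]
    norm_num
    congr 1
    omega
  simp only [greedy_fence]
  rw [hr, fold_tail t l (t.length - 1) 1 [PySem.List.pyGetD t 0 0] (by simp)]
  have hx : PySem.List.pyGetD [PySem.List.pyGetD t 0 0] (-1) 0 = PySem.List.pyGetD t 0 0 := by
    have := PySem.List.pyGetD_neg_one_append_singleton ([] : List Int) (PySem.List.pyGetD t 0 0) 0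
    simpa using this
  rw [hx]
  simp

-- the scan tail unrolled to its first trigger
theorem tail_trig_lt (t : List Int) (l : Int) :
    ∀ (k j : Nat) (v : Int), j + k = t.length →
      (t.drop j).findIdx (fun x => decide (x - v > l)) < k →
      tailFence t l k j v
        = PySem.List.pyGetD t (((j + (t.drop j).findIdx (fun x => decide (x - v > l)) : Nat) : Int) - 1) 0 ::
          tailFence t l (k - ((t.drop j).findIdx (fun x => decide (x - v > l)) + 1))
            (j + (t.drop j).findIdx (fun x => decide (x - v > l)) + 1)
            (PySem.List.pyGetD t (((j + (t.drop j).findIdx (fun x => decide (x - v > l)) : Nat) : Int) - 1) 0) := by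
  intro k
  induction k with
  | zero => intro j v hjk hF; omega
  | succ k ih =>
    intro j v hjk hF
    have hj : j < t.length := by omega
    have hget : PySem.List.pyGetD t (j : Int) 0 = t[j] := by
      rw [PySem.List.pyGetD_eq_getElem t 0 (by omega) (by exact_mod_cast hj)]
      simp
    have hdrop : t.drop j = t[j] :: t.drop (j + 1) := List.drop_eq_getElem_cons hj
    by_cases hc : t[j] - v > l
    · have hFz : (t.drop j).findIdx (fun x => decide (x - v > l)) = 0 := by
        rw [hdrop, List.findIdx_cons]
        simp [hc]
      rw [hFz]
      have : tailFence t l (k + 1) j v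
          = PySem.List.pyGetD t ((j : Int) - 1) 0 ::
            tailFence t l k (j + 1) (PySem.List.pyGetD t ((j : Int) - 1) 0) := by
        simp [tailFence, hget, hc]
      rw [this]
      norm_num
    · have hFs : (t.drop j).findIdx (fun x => decide (x - v > l))
          = (t.drop (j + 1)).findIdx (fun x => decide (x - v > l)) + 1 := by
        rw [hdrop, List.findIdx_cons]
        simp [hc]
      have hstep : tailFence t l (k + 1) j v = tailFence t l k (j + 1) v := by
        simp [tailFence, hget, hc]
      rw [hFs] at hF ⊢
      rw [hstep, ih (j + 1) v (by omega) (by omega)]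
      have e1 : j + ((t.drop (j + 1)).findIdx (fun x => decide (x - v > l)) + 1)
          = j + 1 + (t.drop (j + 1)).findIdx (fun x => decide (x - v > l)) := by omega
      have e2 : k + 1 - ((t.drop (j + 1)).findIdx (fun x => decide (x - v > l)) + 1 + 1)
          = k - ((t.drop (j + 1)).findIdx (fun x => decide (x - v > l)) + 1) := by omega
      rw [e1, e2]

theorem tail_trig_ge (t : List Int) (l : Int) :
    ∀ (k j : Nat) (v : Int), j + k = t.length →
      k ≤ (t.drop j).findIdx (fun x => decide (x - v > l)) →
      tailFence t l k j v = [] := by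
  intro k
  induction k with
  | zero => intro j v _ _; rfl
  | succ k ih =>
    intro j v hjk hF
    have hj : j < t.length := by omega
    have hget : PySem.List.pyGetD t (j : Int) 0 = t[j] := by
      rw [PySem.List.pyGetD_eq_getElem t 0 (by omega) (by exact_mod_cast hj)]
      simp
    have hdrop : t.drop j = t[j] :: t.drop (j + 1) := List.drop_eq_getElem_cons hj
    by_cases hc : t[j] - v > l
    · exfalso
      have : (t.drop j).findIdx (fun x => decide (x - v > l)) = 0 := by
        rw [hdrop, List.findIdx_cons]; simp [hc]
      omega
    · have hFs : (t.drop j).findIdx (fun x => decide (x - v > l))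
          = (t.drop (j + 1)).findIdx (fun x => decide (x - v > l)) + 1 := by
        rw [hdrop, List.findIdx_cons]; simp [hc]
      have hstep : tailFence t l (k + 1) j v = tailFence t l k (j + 1) v := by
        simp [tailFence, hget, hc]
      rw [hstep]
      exact ih (j + 1) v (by omega) (by omega)

-- ===== the doubled array and the window it shows each rotation through =====
theorem length_ddOf (d : List Int) (h : d ≠ []) : (ddOf d).length = 2 * d.length - 1 := by
  have hpos : 0 < d.length := List.length_pos_iff.mpr h
  unfold ddOf
  rw [PySem.List.len_eq]
  simp [PySem.List.length_pyRange_one]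
  omega

theorem rotA_eq_window (d : List Int) (l : Int) (s : Nat) (hd : d ≠ []) (hs : s + 1 ≤ d.length) :
    rotA d l s = ((ddOf d).drop s).take d.length := by
  have hpos : 0 < d.length := List.length_pos_iff.mpr hd
  unfold rotA ddOf
  rw [PySem.List.slice_from_natCast]
  rw [List.drop_append_of_le_length (by omega)]
  rw [List.take_append]
  rw [List.take_of_length_le (by rw [List.length_drop]; omega)]
  congr 1
  rw [List.length_drop]
  have e0 : d.length - (d.length - s) = s := by omega
  rw [e0, ← List.map_take]
  congr 1
  rw [PySem.List.len_eq, PySem.List.pyRange_one, PySem.List.pyRange_one, ← List.map_take,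
    List.take_range]
  have e1 : ((s : Int) + 1 - 1).toNat = s := by omega
  have e2 : ((d.length : Int) - 1).toNat = d.length - 1 := by omega
  have e3 : min s (d.length - 1) = s := by omega
  rw [e1, e2, e3]

theorem length_rotA (d : List Int) (l : Int) (s : Nat) (hd : d ≠ []) (hs : s + 1 ≤ d.length) :
    (rotA d l s).length = d.length := by
  have hpos : 0 < d.length := List.length_pos_iff.mpr hd
  rw [rotA_eq_window d l s hd hs]
  rw [List.length_take, List.length_drop, length_ddOf d hd]
  omega

theorem getElem_rotA (d : List Int) (l : Int) (s : Nat) (hd : d ≠ []) (hs : s + 1 ≤ d.length)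
    (i : Nat) (hi : i < d.length) :
    (rotA d l s)[i]'(by rw [length_rotA d l s hd hs]; exact hi)
      = (ddOf d)[s + i]'(by rw [length_ddOf d hd]; omega) := by
  have h1 := rotA_eq_window d l s hd hs
  have h2 : (rotA d l s)[i]'(by rw [length_rotA d l s hd hs]; exact hi)
      = (((ddOf d).drop s).take d.length)[i]'(by
          rw [List.length_take, List.length_drop, length_ddOf d hd]; omega) := by
    congr 1
  rw [h2, List.getElem_take, List.getElem_drop]

-- ===== the pointer walks compute the scan tail =====
theorem walk_build_eq (d : List Int) (l : Int) (s : Nat) (hd : d ≠ []) (hs : s + 2 ≤ d.length) :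
    ∀ (K : Nat), ∀ (j : Nat) (v : Int) (ends : List Int) (wf : Nat),
      1 ≤ j → j + K = d.length → K < wf →
      walk_build (m1Of (ddOf d) l) (ddOf d) ((s : Int) + (d.length : Int) - 1) wf
          ((fIdx (ddOf d) l v (s + j) : Nat) : Int) ends
        = ends ++ tailFence (rotA d l s) l K j v := by
  have hpos : 0 < d.length := by omega
  have hddlen : (ddOf d).length = 2 * d.length - 1 := length_ddOf d hd
  intro K
  induction K using Nat.strong_induction_on with
  | _ K ih =>
  intro j v ends wf hj hjK hKwf
  obtain ⟨wf', rfl⟩ : ∃ w, wf = w + 1 := ⟨wf - 1, by omega⟩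
  have htd : (rotA d l s).drop j = ((ddOf d).drop (s + j)).take (d.length - j) := by
    rw [rotA_eq_window d l s hd (by omega), List.drop_take, List.drop_drop]
  have hFt : ((rotA d l s).drop j).findIdx (fun x => decide (x - v > l))
      = min (((ddOf d).drop (s + j)).findIdx (fun x => decide (x - v > l))) (d.length - j) := by
    rw [htd, findIdx_take_min]
  have hfIdx : fIdx (ddOf d) l v (s + j)
      = s + j + ((ddOf d).drop (s + j)).findIdx (fun x => decide (x - v > l)) := rfl
  set F := ((ddOf d).drop (s + j)).findIdx (fun x => decide (x - v > l)) with hFdef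
  have hlenT : (rotA d l s).length = d.length := length_rotA d l s hd (by omega)
  simp only [walk_build]
  by_cases hcase : F + j + 1 ≤ d.length
  · have hqle : (((s + j + F : Nat)) : Int) ≤ (s : Int) + (d.length : Int) - 1 := by
      push_cast; omega
    rw [hfIdx, if_pos hqle]
    have hidx : ((((s + j + F : Nat)) : Int) - 1) = (((s + j + F - 1 : Nat)) : Int) := by
      push_cast; omega
    have hval : PySem.List.pyGetD (ddOf d) ((((s + j + F : Nat)) : Int) - 1) 0
        = (ddOf d)[s + j + F - 1]'(by omega) := by
      rw [hidx, PySem.List.pyGetD_eq_getElem (ddOf d) 0 (by omega) (by exact_mod_cast (by omega : s + j + F - 1 < (ddOf d).length))]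
      simp
    have hm1 : PySem.List.pyGetD (m1Of (ddOf d) l) (((s + j + F : Nat)) : Int) 0
        = ((fIdx (ddOf d) l ((ddOf d)[s + j + F - 1]'(by omega)) (s + j + F + 1) : Nat) : Int) :=
      m1_lookup (ddOf d) l (s + j + F) (by omega) (by omega)
    have hFtF : ((rotA d l s).drop j).findIdx (fun x => decide (x - v > l)) = F := by
      rw [hFt]; omega
    have htrig := tail_trig_lt (rotA d l s) l K j v (by omega) (by rw [hFtF]; omega)
    rw [hFtF] at htrig
    have htv : PySem.List.pyGetD (rotA d l s) (((j + F : Nat) : Int) - 1) 0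
        = (ddOf d)[s + j + F - 1]'(by omega) := by
      have e : (((j + F : Nat) : Int) - 1) = (((j + F - 1 : Nat)) : Int) := by push_cast; omega
      rw [e, PySem.List.pyGetD_eq_getElem (rotA d l s) 0 (by omega)
        (by rw [hlenT]; exact_mod_cast (by omega : j + F - 1 < d.length))]
      simp only [Int.toNat_natCast]
      have := getElem_rotA d l s hd (by omega) (j + F - 1) (by omega)
      rw [this]
      congr 1
      omega
    rw [htrig, htv, hval, hm1]
    have harg : (fIdx (ddOf d) l ((ddOf d)[s + j + F - 1]'(by omega)) (s + j + F + 1) : Nat)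
        = (fIdx (ddOf d) l ((ddOf d)[s + j + F - 1]'(by omega)) (s + (j + F + 1)) : Nat) := by
      congr 1
      omega
    rw [harg]
    have hrec := ih (K - (F + 1)) (by omega) (j + F + 1) ((ddOf d)[s + j + F - 1]'(by omega))
      (ends ++ [(ddOf d)[s + j + F - 1]'(by omega)]) wf' (by omega) (by omega) (by omega)
    rw [hrec]
    have e2 : K - (F + 1) = K - F - 1 := by omega
    rw [List.append_assoc, List.singleton_append, e2]
  · have hnot : ¬ ((((s + j + F : Nat)) : Int) ≤ (s : Int) + (d.length : Int) - 1) := by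
      push_cast; omega
    rw [hfIdx, if_neg hnot]
    have : tailFence (rotA d l s) l K j v = [] := by
      apply tail_trig_ge (rotA d l s) l K j v (by omega)
      rw [hFt]; omega
    rw [this]
    simp

theorem walk_count_eq (d : List Int) (l : Int) (s : Nat) (hd : d ≠ []) (hs : s + 2 ≤ d.length) :
    ∀ (K : Nat), ∀ (j : Nat) (v : Int) (c : Int) (wf : Nat),
      1 ≤ j → j + K = d.length → K < wf →
      walk_count (m1Of (ddOf d) l) ((s : Int) + (d.length : Int) - 1) wf
          ((fIdx (ddOf d) l v (s + j) : Nat) : Int) c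
        = c + ((tailFence (rotA d l s) l K j v).length : Int) := by
  have hpos : 0 < d.length := by omega
  have hddlen : (ddOf d).length = 2 * d.length - 1 := length_ddOf d hd
  intro K
  induction K using Nat.strong_induction_on with
  | _ K ih =>
  intro j v c wf hj hjK hKwf
  obtain ⟨wf', rfl⟩ : ∃ w, wf = w + 1 := ⟨wf - 1, by omega⟩
  have htd : (rotA d l s).drop j = ((ddOf d).drop (s + j)).take (d.length - j) := by
    rw [rotA_eq_window d l s hd (by omega), List.drop_take, List.drop_drop]
  have hFt : ((rotA d l s).drop j).findIdx (fun x => decide (x - v > l))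
      = min (((ddOf d).drop (s + j)).findIdx (fun x => decide (x - v > l))) (d.length - j) := by
    rw [htd, findIdx_take_min]
  have hfIdx : fIdx (ddOf d) l v (s + j)
      = s + j + ((ddOf d).drop (s + j)).findIdx (fun x => decide (x - v > l)) := rfl
  set F := ((ddOf d).drop (s + j)).findIdx (fun x => decide (x - v > l)) with hFdef
  have hlenT : (rotA d l s).length = d.length := length_rotA d l s hd (by omega)
  simp only [walk_count]
  by_cases hcase : F + j + 1 ≤ d.length
  · have hqle : (((s + j + F : Nat)) : Int) ≤ (s : Int) + (d.length : Int) - 1 := by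
      push_cast; omega
    rw [hfIdx, if_pos hqle]
    have hidx : ((((s + j + F : Nat)) : Int) - 1) = (((s + j + F - 1 : Nat)) : Int) := by
      push_cast; omega
    have hm1 : PySem.List.pyGetD (m1Of (ddOf d) l) (((s + j + F : Nat)) : Int) 0
        = ((fIdx (ddOf d) l ((ddOf d)[s + j + F - 1]'(by omega)) (s + j + F + 1) : Nat) : Int) :=
      m1_lookup (ddOf d) l (s + j + F) (by omega) (by omega)
    have hFtF : ((rotA d l s).drop j).findIdx (fun x => decide (x - v > l)) = F := by
      rw [hFt]; omega
    have htrig := tail_trig_lt (rotA d l s) l K j v (by omega) (by rw [hFtF]; omega)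
    rw [hFtF] at htrig
    have htv : PySem.List.pyGetD (rotA d l s) (((j + F : Nat) : Int) - 1) 0
        = (ddOf d)[s + j + F - 1]'(by omega) := by
      have e : (((j + F : Nat) : Int) - 1) = (((j + F - 1 : Nat)) : Int) := by push_cast; omega
      rw [e, PySem.List.pyGetD_eq_getElem (rotA d l s) 0 (by omega)
        (by rw [hlenT]; exact_mod_cast (by omega : j + F - 1 < d.length))]
      simp only [Int.toNat_natCast]
      have := getElem_rotA d l s hd (by omega) (j + F - 1) (by omega)
      rw [this]
      congr 1
      omega
    rw [htrig, htv, hm1]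
    have harg : (fIdx (ddOf d) l ((ddOf d)[s + j + F - 1]'(by omega)) (s + j + F + 1) : Nat)
        = (fIdx (ddOf d) l ((ddOf d)[s + j + F - 1]'(by omega)) (s + (j + F + 1)) : Nat) := by
      congr 1
      omega
    rw [harg]
    have hrec := ih (K - (F + 1)) (by omega) (j + F + 1) ((ddOf d)[s + j + F - 1]'(by omega))
      (c + 1) wf' (by omega) (by omega) (by omega)
    rw [hrec]
    have e2 : K - (F + 1) = K - F - 1 := by omega
    rw [e2]
    simp only [List.length_cons]
    push_cast
    ring
  · have hnot : ¬ ((((s + j + F : Nat)) : Int) ≤ (s : Int) + (d.length : Int) - 1) := by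
      push_cast; omega
    rw [hfIdx, if_neg hnot]
    have : tailFence (rotA d l s) l K j v = [] := by
      apply tail_trig_ge (rotA d l s) l K j v (by omega)
      rw [hFt]; omega
    rw [this]
    simp

-- ===== per-start: B's reconstruction and count against A's candidate =====
theorem cand_eq (d : List Int) (l : Int) (s : Nat) (hd : d ≠ []) (hs : s + 2 ≤ d.length) :
    walk_build (m1Of (ddOf d) l) (ddOf d) ((s : Int) + (d.length : Int) - 1) ((m1Of (ddOf d) l).length + 1)
        (PySem.List.pyGetD (m0Of (ddOf d) l) (s : Int) 0) [PySem.List.pyGetD (ddOf d) (s : Int) 0]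
      ++ [PySem.List.pyGetD (ddOf d) ((s : Int) + (d.length : Int) - 1) 0]
    = rotCand d l s := by
  have hpos : 0 < d.length := by omega
  have hddne : ddOf d ≠ [] := by
    apply List.ne_nil_of_length_pos
    rw [length_ddOf d hd]
    omega
  have hm1len : (m1Of (ddOf d) l).length = (ddOf d).length := length_m1Of (ddOf d) l hddne
  have htne : rotA d l s ≠ [] := by
    apply List.ne_nil_of_length_pos
    rw [length_rotA d l s hd (by omega)]
    omega
  have hlenT : (rotA d l s).length = d.length := length_rotA d l s hd (by omega)
  rw [m0_lookup (ddOf d) l s (by rw [length_ddOf d hd]; omega)]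
  rw [walk_build_eq d l s hd hs (d.length - 1) 1 ((ddOf d)[s]'(by rw [length_ddOf d hd]; omega))
    [PySem.List.pyGetD (ddOf d) (s : Int) 0] ((m1Of (ddOf d) l).length + 1)
    (by omega) (by omega) (by rw [hm1len, length_ddOf d hd]; omega)]
  rw [rotCand, greedy_eq (rotA d l s) l htne]
  have hh : PySem.List.pyGetD (rotA d l s) 0 0 = (ddOf d)[s]'(by rw [length_ddOf d hd]; omega) := by
    rw [PySem.List.pyGetD_eq_getElem (rotA d l s) 0 (by omega) (by rw [hlenT]; exact_mod_cast hpos)]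
    have := getElem_rotA d l s hd (by omega) 0 (by omega)
    simpa using this
  have hh2 : PySem.List.pyGetD (ddOf d) (s : Int) 0 = (ddOf d)[s]'(by rw [length_ddOf d hd]; omega) := by
    rw [PySem.List.pyGetD_eq_getElem (ddOf d) 0 (by omega)
      (by exact_mod_cast (by rw [length_ddOf d hd]; omega : s < (ddOf d).length))]
    simp
  have hlast : PySem.List.pyGetD (rotA d l s) (-1) 0
      = PySem.List.pyGetD (ddOf d) ((s : Int) + (d.length : Int) - 1) 0 := by
    rw [PySem.List.pyGetD_neg_one (rotA d l s) 0 htne, List.getLast_eq_getElem]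
    have e1 : (rotA d l s).length - 1 = d.length - 1 := by rw [hlenT]
    have e2 : ((s : Int) + (d.length : Int) - 1) = (((s + d.length - 1 : Nat)) : Int) := by
      push_cast; omega
    rw [e2, PySem.List.pyGetD_eq_getElem (ddOf d) 0 (by omega)
      (by exact_mod_cast (by rw [length_ddOf d hd]; omega : s + d.length - 1 < (ddOf d).length))]
    simp only [Int.toNat_natCast]
    have h3 : (rotA d l s)[(rotA d l s).length - 1]'(by omega)
        = (rotA d l s)[d.length - 1]'(by rw [hlenT]; omega) := by
      congr 1
    rw [h3, getElem_rotA d l s hd (by omega) (d.length - 1) (by omega)]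
    congr 1
    omega
  rw [hh, hh2, hlast, hlenT]
  simp

theorem cnt_eq (d : List Int) (l : Int) (s : Nat) (hd : d ≠ []) (hs : s + 2 ≤ d.length) :
    walk_count (m1Of (ddOf d) l) ((s : Int) + (d.length : Int) - 1) ((m1Of (ddOf d) l).length + 1)
        (PySem.List.pyGetD (m0Of (ddOf d) l) (s : Int) 0) 2
      = ((rotCand d l s).length : Int) := by
  have hpos : 0 < d.length := by omega
  have hddne : ddOf d ≠ [] := by
    apply List.ne_nil_of_length_pos
    rw [length_ddOf d hd]
    omega
  have hm1len : (m1Of (ddOf d) l).length = (ddOf d).length := length_m1Of (ddOf d) l hddne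
  have htne : rotA d l s ≠ [] := by
    apply List.ne_nil_of_length_pos
    rw [length_rotA d l s hd (by omega)]
    omega
  have hlenT : (rotA d l s).length = d.length := length_rotA d l s hd (by omega)
  rw [m0_lookup (ddOf d) l s (by rw [length_ddOf d hd]; omega)]
  rw [walk_count_eq d l s hd hs (d.length - 1) 1 ((ddOf d)[s]'(by rw [length_ddOf d hd]; omega))
    2 ((m1Of (ddOf d) l).length + 1)
    (by omega) (by omega) (by rw [hm1len, length_ddOf d hd]; omega)]
  have hh : PySem.List.pyGetD (rotA d l s) 0 0 = (ddOf d)[s]'(by rw [length_ddOf d hd]; omega) := by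
    rw [PySem.List.pyGetD_eq_getElem (rotA d l s) 0 (by omega) (by rw [hlenT]; exact_mod_cast hpos)]
    have := getElem_rotA d l s hd (by omega) 0 (by omega)
    simpa using this
  rw [rotCand, greedy_eq (rotA d l s) l htne, hh, hlenT]
  simp only [List.length_append, List.length_cons, List.length_nil]
  push_cast
  ring

-- ===== the two start loops as folds over the starts 0,…,k₀-1 =====
theorem bf_loop_eq (d : List Int) (l : Int) (k₀ : Nat) (hk : k₀ < d.length)
    (h1 : ∀ j (hj : j < k₀), d[j]'(by omega) < l) (h2 : l ≤ d[k₀]) :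
    ∀ (fuel j : Nat) (best : Option (List Int)), j ≤ k₀ → k₀ < fuel + j →
      bf_loop d l fuel (j : Int) best
        = (List.range' j (k₀ - j)).foldl (fun best s => py_update_best best (rotCand d l s)) best := by
  intro fuel
  induction fuel with
  | zero => intro j best hj hlt; omega
  | succ fuel ih =>
    intro j best hj hlt
    have hjlen : j < d.length := by omega
    simp only [bf_loop, PySem.List.pyGet?_natCast, List.getElem?_eq_getElem hjlen]
    by_cases hcase : j < k₀
    · rw [if_pos (h1 j hcase)]
      rw [PySem.List.foldl_append_singleton_eq_map]
      have hcast : ((j : Int) + 1) = ((j + 1 : Nat) : Int) := by push_cast; ring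
      rw [hcast, ih (j + 1) _ (by omega) (by omega)]
      have hr : k₀ - j = (k₀ - (j + 1)) + 1 := by omega
      rw [hr, List.range'_succ]
      simp only [List.foldl_cons]
      rfl
    · have hj' : j = k₀ := by omega
      subst hj'
      rw [if_neg (not_lt.mpr h2)]
      simp

theorem alt_loop_eq (d : List Int) (l : Int) (m0 m1 : List Int) (k₀ : Nat) (hk : k₀ < d.length)
    (h1 : ∀ j (hj : j < k₀), d[j]'(by omega) < l) (h2 : l ≤ d[k₀]) :
    ∀ (fuel j : Nat) (best : Option (Int × Int)), j ≤ k₀ → k₀ < fuel + j →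
      alt_loop d l (PySem.List.len d) m0 m1 fuel (j : Int) best
        = (List.range' j (k₀ - j)).foldl
            (fun (b : Option (Int × Int)) (s : Nat) => alt_update b (s : Int)
              (walk_count m1 ((s : Int) + (d.length : Int) - 1) (m1.length + 1)
                (PySem.List.pyGetD m0 (s : Int) 0) 2)) best := by
  intro fuel
  induction fuel with
  | zero => intro j best hj hlt; omega
  | succ fuel ih =>
    intro j best hj hlt
    have hjlen : j < d.length := by omega
    simp only [alt_loop, PySem.List.pyGet?_natCast, List.getElem?_eq_getElem hjlen]
    by_cases hcase : j < k₀
    · rw [if_pos (h1 j hcase)]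
      have hcast : ((j : Int) + 1) = ((j + 1 : Nat) : Int) := by push_cast; ring
      rw [hcast, ih (j + 1) _ (by omega) (by omega)]
      have hr : k₀ - j = (k₀ - (j + 1)) + 1 := by omega
      rw [hr, List.range'_succ]
      simp only [List.foldl_cons, PySem.List.len_eq]
    · have hj' : j = k₀ := by omega
      subst hj'
      rw [if_neg (not_lt.mpr h2)]
      simp

-- abbreviation for B's per-start segment count (proof vocabulary only)
def cntOf (d : List Int) (l : Int) (s : Nat) : Int :=
  walk_count (m1Of (ddOf d) l) ((s : Int) + (d.length : Int) - 1) ((m1Of (ddOf d) l).length + 1)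
    (PySem.List.pyGetD (m0Of (ddOf d) l) (s : Int) 0) 2

-- A's best-candidate fold and B's (start, count) fold stay related
theorem fold_rel (d : List Int) (l : Int) (ss : List Nat) :
    ∀ (bs : Nat),
      (∀ x, (x = bs ∨ x ∈ ss) → cntOf d l x = ((rotCand d l x).length : Int)) →
      ∃ bs' : Nat, (bs' = bs ∨ bs' ∈ ss)
        ∧ ss.foldl (fun (b : Option (Int × Int)) (s : Nat) => alt_update b (s : Int) (cntOf d l s)) (some ((bs : Int), cntOf d l bs))
            = some ((bs' : Int), cntOf d l bs')
        ∧ ss.foldl (fun best s => py_update_best best (rotCand d l s)) (some (rotCand d l bs))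
            = some (rotCand d l bs') := by
  induction ss with
  | nil => intro bs _; exact ⟨bs, Or.inl rfl, rfl, rfl⟩
  | cons s ss ih =>
    intro bs hc
    have hcs : cntOf d l s = ((rotCand d l s).length : Int) := hc s (Or.inr (List.mem_cons_self))
    have hcb : cntOf d l bs = ((rotCand d l bs).length : Int) := hc bs (Or.inl rfl)
    simp only [List.foldl_cons]
    by_cases hlt : (rotCand d l s).length < (rotCand d l bs).length
    · have hltc : cntOf d l s < cntOf d l bs := by
        rw [hcs, hcb]; exact_mod_cast hlt
      have hstepB : alt_update (some ((bs : Int), cntOf d l bs)) (s : Int) (cntOf d l s)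
          = some ((s : Int), cntOf d l s) := by
        simp only [alt_update]
        rw [if_pos hltc]
      have hstepA : py_update_best (some (rotCand d l bs)) (rotCand d l s)
          = some (rotCand d l s) := by
        simp only [py_update_best]
        rw [if_pos hlt]
      rw [hstepB, hstepA]
      obtain ⟨bs', hmem, hB, hA⟩ := ih s (fun x hx => hc x (by
        rcases hx with h | h
        · exact Or.inr (h ▸ List.mem_cons_self)
        · exact Or.inr (List.mem_cons_of_mem _ h)))
      refine ⟨bs', ?_, hB, hA⟩
      rcases hmem with h | h
      · exact Or.inr (h ▸ List.mem_cons_self)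
      · exact Or.inr (List.mem_cons_of_mem _ h)
    · have hltc : ¬ cntOf d l s < cntOf d l bs := by
        rw [hcs, hcb]; exact_mod_cast hlt
      have hstepB : alt_update (some ((bs : Int), cntOf d l bs)) (s : Int) (cntOf d l s)
          = some ((bs : Int), cntOf d l bs) := by
        simp only [alt_update]
        rw [if_neg hltc]
      have hstepA : py_update_best (some (rotCand d l bs)) (rotCand d l s)
          = some (rotCand d l bs) := by
        simp only [py_update_best]
        rw [if_neg hlt]
      rw [hstepB, hstepA]
      obtain ⟨bs', hmem, hB, hA⟩ := ih bs (fun x hx => hc x (by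
        rcases hx with h | h
        · exact Or.inl h
        · exact Or.inr (List.mem_cons_of_mem _ h)))
      refine ⟨bs', ?_, hB, hA⟩
      rcases hmem with h | h
      · exact Or.inl h
      · exact Or.inr (List.mem_cons_of_mem _ h)

-- ===== VERDICT (by name: the statement is the Claim_ definition above) =====
theorem brute_force_optimize_spec : Claim_equal_brute_force_optimize := by
  intro d l _ hpre
  unfold Spec_brute_force_optimize
  have hk : d.findIdx (fun x => decide (l ≤ x)) < d.length := by
    apply List.findIdx_lt_length_of_exists
    simpa using hpre
  set k₀ := d.findIdx (fun x => decide (l ≤ x)) with hk₀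
  have h2 : l ≤ d[k₀] := by
    have := List.findIdx_getElem (w := hk)
    simpa using this
  have h1 : ∀ j (hj : j < k₀), d[j]'(by omega) < l := by
    intro j hj
    have := List.not_of_lt_findIdx hj (xs := d)
    simpa using this
  have hd : d ≠ [] := List.ne_nil_of_length_pos (by omega)
  have hA : brute_force_optimize d l
      = (List.range' 0 k₀).foldl (fun best s => py_update_best best (rotCand d l s)) none := by
    have := bf_loop_eq d l k₀ hk h1 h2 (d.length + 1) 0 none (by omega) (by omega)
    simpa [brute_force_optimize] using this
  have hBloop : alt_loop d l (PySem.List.len d) (m0Of (ddOf d) l) (m1Of (ddOf d) l) (d.length + 1) 0 none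
      = (List.range' 0 k₀).foldl
          (fun (b : Option (Int × Int)) (s : Nat) => alt_update b (s : Int) (cntOf d l s)) none := by
    have := alt_loop_eq d l (m0Of (ddOf d) l) (m1Of (ddOf d) l) k₀ hk h1 h2 (d.length + 1) 0 none
      (by omega) (by omega)
    simpa [cntOf] using this
  rcases Nat.eq_zero_or_pos k₀ with hz | hposk
  · rw [hz] at hA hBloop
    simp only [List.range'_zero, List.foldl_nil] at hA hBloop
    rw [hA]
    simp only [brute_force_optimize_alt]
    rw [hBloop]
  · obtain ⟨m, hm⟩ : ∃ m, k₀ = m + 1 := ⟨k₀ - 1, by omega⟩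
    have hrange : List.range' 0 k₀ = 0 :: List.range' 1 m := by
      rw [hm, List.range'_succ]
    have hc : ∀ x, (x = 0 ∨ x ∈ List.range' 1 m) → cntOf d l x = ((rotCand d l x).length : Int) := by
      intro x hx
      have hxlt : x < k₀ := by
        rcases hx with h | h
        · omega
        · have := List.mem_range'_1.mp h
          omega
      exact cnt_eq d l x hd (by omega)
    rw [hrange] at hA hBloop
    simp only [List.foldl_cons] at hA hBloop
    have hA0 : py_update_best none (rotCand d l 0) = some (rotCand d l 0) := rfl
    have hB0 : alt_update none ((0 : Nat) : Int) (cntOf d l 0) = some (((0 : Nat) : Int), cntOf d l 0) := rfl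
    rw [hA0] at hA
    rw [hB0] at hBloop
    obtain ⟨bs', hmem, hB, hA'⟩ := fold_rel d l (List.range' 1 m) 0 hc
    rw [hB] at hBloop
    rw [hA'] at hA
    have hbs'lt : bs' < k₀ := by
      rcases hmem with h | h
      · omega
      · have := List.mem_range'_1.mp h
        omega
    rw [hA]
    simp only [brute_force_optimize_alt]
    rw [hBloop]
    have hcand := cand_eq d l bs' hd (by omega)
    simp only [PySem.List.len_eq]
    exact congrArg some hcand.symm
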